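-- pv_equiv track=rewrite | github.com/spetrone/noctua-osint | noctua_app/tasks.py | zoomeye_filter_short
-- ===== SOURCE A (Python) =====
-- filter_keys = ["rdns", "ip" , "port", "service"]
--
-- def zoomeye_filter_short(data_list) :
--     filter_list = []
--     for d in data_list :
--         sub_dict = {}
--         for k in filter_keys :
--             if k in d.keys() :
--                 sub_dict[k] = d[k]
--         filter_list.append(sub_dict)
--     return filter_list
-- ===== SOURCE B (Python) =====
-- filter_keys = ["rdns", "ip", "port", "service"]
-- _SLOT = {"rdns": 0, "ip": 1, "port": 2, "service": 3}
-- _MISSING = object()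
--
-- def zoomeye_filter_short(data_list):
--     result = []
--     for d in data_list:
--         slots = [_MISSING, _MISSING, _MISSING, _MISSING]
--         for k, v in d.items():
--             i = _SLOT.get(k)
--             if i is not None:
--                 slots[i] = v
--         result.append({k: v for k, v in zip(filter_keys, slots) if v is not _MISSING})
--     return result
-- ===== Notes on version B (the rewrite author's own statement) =====
-- stated objective: alternative
-- what changed: B makes one pass over each dict's own entries, routing kept keys through a constant key->slot index map into a 4-slot table and assembling the result dict from the slots, instead of probing the dict once per fixed filter key.
import Mathlib
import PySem

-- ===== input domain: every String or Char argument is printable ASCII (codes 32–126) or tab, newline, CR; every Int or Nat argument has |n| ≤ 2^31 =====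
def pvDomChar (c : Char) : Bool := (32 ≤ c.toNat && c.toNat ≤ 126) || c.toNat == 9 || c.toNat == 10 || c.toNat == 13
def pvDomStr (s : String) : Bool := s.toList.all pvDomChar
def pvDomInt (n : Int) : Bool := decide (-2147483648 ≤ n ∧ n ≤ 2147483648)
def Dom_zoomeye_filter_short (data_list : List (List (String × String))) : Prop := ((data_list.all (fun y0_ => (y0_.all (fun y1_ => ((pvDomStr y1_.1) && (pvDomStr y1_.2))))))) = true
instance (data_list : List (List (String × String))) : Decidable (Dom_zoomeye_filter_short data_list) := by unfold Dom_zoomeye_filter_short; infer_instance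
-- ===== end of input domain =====

-- B builds each projected dict in ONE pass over the data's own entries (a slot table keyed by a
-- constant index map) instead of probing the dict once per fixed key; same return value.

-- ===== PORT A =====
-- dict assignment sub_dict[k] = v : overwrite in place if present, else append
def pvDictSet (d : List (String × String)) (k v : String) : List (String × String) :=
  if d.any (fun kv => kv.1 = k) then d.map (fun kv => if kv.1 = k then (k, v) else kv)
  else d ++ [(k, v)]

def pvFilterKeys : List String := ["rdns", "ip", "port", "service"]

def zoomeye_filter_short (data_list : List (List (String × String))) : List (List (String × String)) :=
  data_list.foldl (fun filter_list d =>
    let sub_dict := pvFilterKeys.foldl (fun sub_dict k =>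
      match d.lookup k with        -- 'if k in d.keys(): sub_dict[k] = d[k]' — dict lookup = first match
      | some v => pvDictSet sub_dict k v
      | none   => sub_dict) []
    filter_list ++ [sub_dict]) []

-- ===== PORT B =====
-- _SLOT.get(k)
def pvSlotIdx (k : String) : Option Nat :=
  if k = "rdns" then some 0 else if k = "ip" then some 1
  else if k = "port" then some 2 else if k = "service" then some 3 else none

-- the body of B's inner loop
def pvStep (slots : List (Option String)) (kv : String × String) : List (Option String) :=
  match pvSlotIdx kv.1 with
  | some i => slots.set i (some kv.2)
  | none   => slots

-- one pass over d's entries, last write wins (keys of a Python dict are unique)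
def pvSlots (d : List (String × String)) : List (Option String) :=
  d.foldl pvStep [none, none, none, none]

-- {k: v for k, v in zip(filter_keys, slots) if v is not _MISSING}
def pvAssemble (slots : List (Option String)) : List (String × String) :=
  (pvFilterKeys.zip slots).foldl (fun acc p =>
    match p.2 with
    | some v => acc ++ [(p.1, v)]
    | none   => acc) []

def zoomeye_filter_short_alt (data_list : List (List (String × String))) : List (List (String × String)) :=
  data_list.foldl (fun result d => result ++ [pvAssemble (pvSlots d)]) []

-- ===== PRECONDITION & SPEC =====
-- Each inner association list represents a Python dict, whose keys are necessarily distinct;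
-- duplicate-key lists have no Python-dict counterpart and are excluded.
def Pre_zoomeye_filter_short (data_list : List (List (String × String))) : Prop :=
  ∀ d ∈ data_list, (d.map Prod.fst).Nodup

instance (data_list : List (List (String × String))) : Decidable (Pre_zoomeye_filter_short data_list) := by
  unfold Pre_zoomeye_filter_short; infer_instance

def pvWitness_zoomeye_filter_short : (List (List (String × String))) :=
  [[("ip", "1.2.3.4"), ("extra", "x"), ("rdns", "host")], []]

def Spec_zoomeye_filter_short (data_list : List (List (String × String))) (out : List (List (String × String))) : Prop := out = zoomeye_filter_short_alt data_list
instance (data_list : List (List (String × String))) (out : List (List (String × String))) : Decidable (Spec_zoomeye_filter_short data_list out) := by unfold Spec_zoomeye_filter_short; infer_instance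

-- ===== CLAIM (what is proved, stated in full; the proofs are below) =====
def Claim_equal_zoomeye_filter_short : Prop := ∀ (data_list : List (List (String × String))), Dom_zoomeye_filter_short data_list → Pre_zoomeye_filter_short data_list → Spec_zoomeye_filter_short data_list (zoomeye_filter_short data_list)

-- ===== LEMMAS AND PROOFS =====

lemma pvLookup_none_of_not_mem (t : List (String × String)) (k : String)
    (hk : k ∉ t.map Prod.fst) : t.lookup k = none := by
  induction t with
  | nil => rfl
  | cons kv t ih =>
    simp only [List.map_cons, List.mem_cons, not_or] at hk
    simp [List.lookup, ih hk.2, beq_eq_false_iff_ne.mpr hk.1]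

-- combine: what B's one pass over d does to an initial slot value
def pvComb (o s : Option String) : Option String := match o with | some v => some v | none => s

lemma pvSlots_go (d : List (String × String)) (a b c e : Option String)
    (h : (d.map Prod.fst).Nodup) :
    d.foldl pvStep [a, b, c, e]
    = [pvComb (d.lookup "rdns") a, pvComb (d.lookup "ip") b,
       pvComb (d.lookup "port") c, pvComb (d.lookup "service") e] := by
  induction d generalizing a b c e with
  | nil => simp [pvComb]
  | cons kv t ih =>
    obtain ⟨k, v⟩ := kv
    simp only [List.map_cons, List.nodup_cons] at h
    obtain ⟨hk, ht⟩ := h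
    rw [List.foldl_cons]
    by_cases h0 : k = "rdns"
    · subst h0
      rw [show pvStep [a, b, c, e] ("rdns", v) = [some v, b, c, e] by simp [pvStep, pvSlotIdx],
          ih _ _ _ _ ht, pvLookup_none_of_not_mem t "rdns" hk]
      simp [List.lookup, pvComb]
    · by_cases h1 : k = "ip"
      · subst h1
        rw [show pvStep [a, b, c, e] ("ip", v) = [a, some v, c, e] by simp [pvStep, pvSlotIdx],
            ih _ _ _ _ ht, pvLookup_none_of_not_mem t "ip" hk]
        simp [List.lookup, pvComb]
      · by_cases h2 : k = "port"
        · subst h2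
          rw [show pvStep [a, b, c, e] ("port", v) = [a, b, some v, e] by simp [pvStep, pvSlotIdx],
              ih _ _ _ _ ht, pvLookup_none_of_not_mem t "port" hk]
          simp [List.lookup, pvComb]
        · by_cases h3 : k = "service"
          · subst h3
            rw [show pvStep [a, b, c, e] ("service", v) = [a, b, c, some v] by simp [pvStep, pvSlotIdx],
                ih _ _ _ _ ht, pvLookup_none_of_not_mem t "service" hk]
            simp [List.lookup, pvComb]
          · rw [show pvStep [a, b, c, e] (k, v) = [a, b, c, e] by
                  simp [pvStep, pvSlotIdx, h0, h1, h2, h3],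
                ih _ _ _ _ ht]
            simp [List.lookup, beq_eq_false_iff_ne.mpr (Ne.symm h0),
                  beq_eq_false_iff_ne.mpr (Ne.symm h1), beq_eq_false_iff_ne.mpr (Ne.symm h2),
                  beq_eq_false_iff_ne.mpr (Ne.symm h3)]

lemma pvInner_eq (d : List (String × String)) (h : (d.map Prod.fst).Nodup) :
    (pvFilterKeys.foldl (fun sub_dict k =>
      match d.lookup k with
      | some v => pvDictSet sub_dict k v
      | none   => sub_dict) []) = pvAssemble (pvSlots d) := by
  unfold pvSlots
  rw [pvSlots_go d none none none none h]
  cases h0 : d.lookup "rdns" <;> cases h1 : d.lookup "ip" <;>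
    cases h2 : d.lookup "port" <;> cases h3 : d.lookup "service" <;>
    simp [pvFilterKeys, pvAssemble, pvComb, pvDictSet, h0, h1, h2, h3]

lemma pvFoldl_push {α β : Type} (f : α → β) (l : List α) (acc : List β) :
    l.foldl (fun a x => a ++ [f x]) acc = acc ++ l.map f := by
  induction l generalizing acc with
  | nil => simp
  | cons x t ih => simp [ih]

-- ===== VERDICT (by name: the statement is the Claim_ definition above) =====
theorem zoomeye_filter_short_spec : Claim_equal_zoomeye_filter_short := by
  intro data_list _ hpre
  unfold Spec_zoomeye_filter_short zoomeye_filter_short zoomeye_filter_short_alt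
  rw [pvFoldl_push, pvFoldl_push, List.nil_append, List.nil_append]
  exact List.map_congr_left fun d hd => pvInner_eq d (hpre d hd)
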